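-- pv_equiv track=rewrite | github.com/JonahWeinbaum/building-a-bombe | Code/src/register_light_experiments/bridges.py | bridges_cycles
-- ===== SOURCE A (Python) =====
-- import itertools
-- import itertools
--
-- def bridges_cycles(a, b):
--     if(len(a) == 1):
--         return True
--
--     bridges = list(itertools.combinations(a, 2))
--     for comp in b:
--         for bridge in bridges:
--             b1 = [value for value in comp if value in bridge[0]]
--             b2 = [value for value in comp if value in bridge[1]]
--             # Bridge found
--             if len(b1) > 0 and len(b2) > 0:
--                 a.remove(bridge[0])
--                 a.remove(bridge[1])
--                 t = []
--                 for c in bridge[0]: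
--                     t.append(c)
--                 for c in bridge[1]:
--                     t.append(c)
--                 a.append(t)
--                 return bridges_cycles(a, b)
--     return False
-- ===== SOURCE B (Python) =====
-- def bridges_cycles(a, b):
--     # Blob absorption: grow the first component by repeatedly absorbing any
--     # component that shares a bridging set with it; all absorbed <=> mergeable to one.
--     # (Return value only: unlike A, this does not mutate `a` in place.)
--     if not a:
--         return False
--     cur, rest = a[0], a[1:]
--     changed = True
--     while changed and rest:
--         changed = False
--         still = []
--         for c in rest:
--             if any(any(v in cur for v in s) and any(v in c for v in s) for s in b):
--                 cur = cur + c
--                 changed = True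
--             else:
--                 still.append(c)
--         rest = still
--     return not rest
-- ===== Notes on version B (the rewrite author's own statement) =====
-- stated objective: faster
-- what changed: Replaced the recursive merge-first-bridging-pair-and-restart algorithm (which rebuilds all component pairs on every recursive call) by an iterative blob-absorption pass: grow the first component by absorbing any component sharing a bridging set with it until a fixpoint, then check nothing is left; no recursion, no pair enumeration, no list mutation.
import Mathlib
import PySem

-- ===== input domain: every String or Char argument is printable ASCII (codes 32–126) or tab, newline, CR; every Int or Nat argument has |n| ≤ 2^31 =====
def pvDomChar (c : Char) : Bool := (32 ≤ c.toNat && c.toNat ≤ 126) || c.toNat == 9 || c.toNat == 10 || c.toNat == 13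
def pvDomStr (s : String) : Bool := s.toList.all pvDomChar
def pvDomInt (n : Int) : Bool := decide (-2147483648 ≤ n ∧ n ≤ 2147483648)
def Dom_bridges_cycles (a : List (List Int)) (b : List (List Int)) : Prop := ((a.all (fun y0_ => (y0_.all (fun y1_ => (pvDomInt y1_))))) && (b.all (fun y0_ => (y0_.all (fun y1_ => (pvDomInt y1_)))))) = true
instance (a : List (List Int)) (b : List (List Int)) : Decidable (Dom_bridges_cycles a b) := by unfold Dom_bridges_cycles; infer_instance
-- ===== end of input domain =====

-- B replaces A's recursive merge-first-bridging-pair-and-restart search by one iterative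
-- blob-absorption fixpoint (no pair enumeration, no recursion); equivalence is about the
-- RETURN value only: Python A mutates its argument `a` in place, B does not.

-- ===== PORT A =====

/-- `list(itertools.combinations(a, 2))`: all pairs `(a[i], a[j])`, `i < j`, lexicographic. -/
def pvCombos2 (l : List (List Int)) : List (List Int × List Int) :=
  match l with
  | [] => []
  | x :: xs => xs.map (fun y => (x, y)) ++ pvCombos2 xs

/-- the body of A's `if len(b1) > 0 and len(b2) > 0` test for one `comp` and one `bridge`:
    `b1 = [value for value in comp if value in bridge[0]]`, same for `b2`. -/
def pvBridgeTest (comp : List Int) (br : List Int × List Int) : Bool :=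
  decide (0 < (comp.filter (fun v => br.1.contains v)).length) &&
  decide (0 < (comp.filter (fun v => br.2.contains v)).length)

/-- `for comp in b: for bridge in bridges: if <test>: …` — the first hit, outer loop over `b`. -/
def pvFindBridge (b : List (List Int)) (bridges : List (List Int × List Int)) :
    Option (List Int × List Int) :=
  b.findSome? (fun comp => bridges.find? (fun br => pvBridgeTest comp br))

theorem pvRemove?_length {xs r : List (List Int)} {v : List Int}
    (h : PySem.List.remove? xs v = some r) : r.length + 1 = xs.length := by
  have hv : v ∈ xs := by
    by_contra hv
    rw [(PySem.List.remove?_eq_none_iff xs v).2 hv] at h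
    simp at h
  have hr : r = xs.erase v := by
    rw [PySem.List.remove?_eq_some_erase xs v hv] at h
    exact (Option.some.inj h).symm
  subst hr
  have h1 := List.length_erase_of_mem hv
  have h2 := List.length_pos_of_mem hv
  omega

def bridges_cycles (a : List (List Int)) (b : List (List Int)) : Bool :=
  if a.length = 1 then true
  else
    match _hf : pvFindBridge b (pvCombos2 a) with
    | none => false
    | some (c1, c2) =>
      match h1 : PySem.List.remove? a c1 with
      | none => false  -- unreachable: Python `a.remove` would raise, but `c1` is drawn from `a`
      | some a1 =>
        match h2 : PySem.List.remove? a1 c2 with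
        | none => false  -- unreachable likewise
        | some a2 => bridges_cycles (a2 ++ [c1 ++ c2]) b
termination_by a.length
decreasing_by
  have e1 := pvRemove?_length h1
  have e2 := pvRemove?_length h2
  simp only [List.length_append, List.length_cons, List.length_nil]
  omega

-- ===== PORT B =====

/-- Source B's `any(any(v in cur for v in s) and any(v in c for v in s) for s in b)`. -/
def pvLinked (b : List (List Int)) (x y : List Int) : Bool :=
  b.any (fun s => s.any (fun v => x.contains v) && s.any (fun v => y.contains v))

/-- one `for c in rest:` pass of Source B's while-loop; returns (cur, still, changed). -/
def pvPass (b : List (List Int)) (cur : List Int) (rest : List (List Int)) :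
    List Int × List (List Int) × Bool :=
  match rest with
  | [] => (cur, [], false)
  | c :: cs =>
    if pvLinked b cur c then
      let r := pvPass b (cur ++ c) cs
      (r.1, r.2.1, true)
    else
      let r := pvPass b cur cs
      (r.1, c :: r.2.1, r.2.2)

theorem pvPass_len_le (b : List (List Int)) (cur : List Int) (rest : List (List Int)) :
    (pvPass b cur rest).2.1.length ≤ rest.length := by
  induction rest generalizing cur with
  | nil => simp [pvPass]
  | cons c cs ih =>
    simp only [pvPass]
    split
    · exact Nat.le_succ_of_le (ih _)
    · simpa using Nat.succ_le_succ (ih cur)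

theorem pvPass_changed_lt (b : List (List Int)) (cur : List Int) (rest : List (List Int))
    (h : (pvPass b cur rest).2.2 = true) : (pvPass b cur rest).2.1.length < rest.length := by
  induction rest generalizing cur with
  | nil => simp [pvPass] at h
  | cons c cs ih =>
    simp only [pvPass] at h ⊢
    split at h <;> rename_i hl
    · simp only [hl, if_true]
      exact Nat.lt_succ_of_le (pvPass_len_le b (cur ++ c) cs)
    · simp only [hl]
      simpa using Nat.succ_lt_succ (ih cur h)

/-- Source B's `while changed and rest:` loop; returns `not rest` at the end. -/
def pvGrow (b : List (List Int)) (cur : List Int) (rest : List (List Int)) : Bool :=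
  match rest with
  | [] => true
  | c :: cs =>
    let r := pvPass b cur (c :: cs)
    if h : r.2.2 = true then pvGrow b r.1 r.2.1 else r.2.1.isEmpty
termination_by rest.length
decreasing_by exact pvPass_changed_lt b cur (c :: cs) h

def bridges_cycles_alt (a : List (List Int)) (b : List (List Int)) : Bool :=
  match a with
  | [] => false
  | c :: rest => pvGrow b c rest

-- ===== PRECONDITION & SPEC =====
def Spec_bridges_cycles (a : List (List Int)) (b : List (List Int)) (out : Bool) : Prop := out = bridges_cycles_alt a b
instance (a : List (List Int)) (b : List (List Int)) (out : Bool) : Decidable (Spec_bridges_cycles a b out) := by unfold Spec_bridges_cycles; infer_instance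

-- ===== CLAIM (what is proved, stated in full; the proofs are below) =====
def Claim_equal_bridges_cycles : Prop := ∀ (a : List (List Int)) (b : List (List Int)), Dom_bridges_cycles a b → Spec_bridges_cycles a b (bridges_cycles a b)

-- ===== LEMMAS AND PROOFS =====

/-- The common specification: the multiset of components can be reduced to a single
    component by repeatedly concatenating two components linked through some set of `b`. -/
inductive Mergeable (b : List (List Int)) : Multiset (List Int) → Prop
  | single (c : List Int) : Mergeable b {c}
  | step {s : Multiset (List Int)} {c1 c2 : List Int} :
      pvLinked b c1 c2 = true → Mergeable b ((c1 ++ c2) ::ₘ s) →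
      Mergeable b (c1 ::ₘ c2 ::ₘ s)

theorem pvLinked_iff (b : List (List Int)) (x y : List Int) :
    pvLinked b x y = true ↔ ∃ s ∈ b, (∃ v ∈ s, v ∈ x) ∧ (∃ v ∈ s, v ∈ y) := by
  simp [pvLinked]

theorem pvLinked_symm (b : List (List Int)) (x y : List Int) :
    pvLinked b x y = pvLinked b y x := by
  rw [Bool.eq_iff_iff]
  simp only [pvLinked_iff]
  constructor <;> rintro ⟨s, hs, h1, h2⟩ <;> exact ⟨s, hs, h2, h1⟩

theorem pvLinked_congr_left {b : List (List Int)} {x x' : List Int}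
    (h : ∀ v : Int, v ∈ x ↔ v ∈ x') (y : List Int) :
    pvLinked b x y = pvLinked b x' y := by
  rw [Bool.eq_iff_iff]
  simp only [pvLinked_iff]
  constructor <;> rintro ⟨s, hs, ⟨v, hv, hvx⟩, h2⟩
  · exact ⟨s, hs, ⟨v, hv, (h v).1 hvx⟩, h2⟩
  · exact ⟨s, hs, ⟨v, hv, (h v).2 hvx⟩, h2⟩

theorem pvLinked_append (b : List (List Int)) (x y z : List Int) :
    pvLinked b (x ++ y) z = (pvLinked b x z || pvLinked b y z) := by
  rw [Bool.eq_iff_iff]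
  simp only [Bool.or_eq_true, pvLinked_iff]
  constructor
  · rintro ⟨s, hs, ⟨v, hv, hvx⟩, h2⟩
    rcases List.mem_append.1 hvx with h | h
    · exact Or.inl ⟨s, hs, ⟨v, hv, h⟩, h2⟩
    · exact Or.inr ⟨s, hs, ⟨v, hv, h⟩, h2⟩
  · rintro (⟨s, hs, ⟨v, hv, hvx⟩, h2⟩ | ⟨s, hs, ⟨v, hv, hvx⟩, h2⟩)
    · exact ⟨s, hs, ⟨v, hv, List.mem_append.2 (Or.inl hvx)⟩, h2⟩
    · exact ⟨s, hs, ⟨v, hv, List.mem_append.2 (Or.inr hvx)⟩, h2⟩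

theorem cons_cases {α : Type} {a x : α} {s t : Multiset α} (h : a ::ₘ s = x ::ₘ t) :
    (a = x ∧ s = t) ∨ ∃ u, s = x ::ₘ u ∧ t = a ::ₘ u := by
  rcases Multiset.cons_eq_cons.1 h with ⟨h1, h2⟩ | ⟨_, u, h1, h2⟩
  · exact Or.inl ⟨h1, h2⟩
  · exact Or.inr ⟨u, h1, h2⟩

theorem Mergeable_congr {b : List (List Int)} :
    ∀ {t : Multiset (List Int)}, Mergeable b t →
    ∀ {c c' : List Int} {s : Multiset (List Int)},
      t = c ::ₘ s → (∀ v : Int, v ∈ c ↔ v ∈ c') → Mergeable b (c' ::ₘ s) := by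
  intro t ht
  induction ht with
  | single c0 =>
    intro c c' s hEq hmem
    rcases (Multiset.singleton_eq_cons_iff _).1 hEq with ⟨h1, h2⟩
    subst h2
    exact Mergeable.single c'
  | step hl hm ih =>
    rename_i s0 c1 c2
    intro c c' s hEq hmem
    rcases cons_cases hEq with ⟨h1, h2⟩ | ⟨u, hu1, hu2⟩
    · -- c1 = c
      have hmem' : ∀ v : Int, v ∈ c1 ↔ v ∈ c' := fun v => (h1 ▸ hmem) v
      rw [← h2]
      refine Mergeable.step ?_ ?_
      · rw [← pvLinked_congr_left hmem' c2]; exact hl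
      · exact ih rfl (fun v => by simp only [List.mem_append]; exact or_congr (hmem' v) Iff.rfl)
    · rcases cons_cases hu1 with ⟨h1, h2⟩ | ⟨w, hw1, hw2⟩
      · -- c2 = c
        have hmem' : ∀ v : Int, v ∈ c2 ↔ v ∈ c' := fun v => (h1 ▸ hmem) v
        subst hu2
        rw [← h2, Multiset.cons_swap]
        refine Mergeable.step ?_ ?_
        · rw [pvLinked_symm, ← pvLinked_congr_left hmem' c1, ← pvLinked_symm]; exact hl
        · exact ih rfl (fun v => by simp only [List.mem_append]; exact or_congr Iff.rfl (hmem' v))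
      · -- c ∈ s0
        subst hu2; subst hw2; subst hw1
        have h1 : Mergeable b (c' ::ₘ (c1 ++ c2) ::ₘ w) := ih (Multiset.cons_swap _ _ _) hmem
        have h2 := Mergeable.step hl ((Multiset.cons_swap _ _ _) ▸ h1)
        rw [Multiset.cons_swap c' c1, Multiset.cons_swap c' c2]
        exact h2

theorem Mergeable_exchange {b : List (List Int)} :
    ∀ {t : Multiset (List Int)}, Mergeable b t →
    ∀ {x y : List Int} {s : Multiset (List Int)},
      t = x ::ₘ y ::ₘ s → pvLinked b x y = true → Mergeable b ((x ++ y) ::ₘ s) := by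
  intro t ht
  induction ht with
  | single c0 =>
    intro x y s hEq _
    exfalso
    have := congrArg Multiset.card hEq
    simp at this
  | step hl hm ih =>
    rename_i s0 c1 c2
    intro x y s hEq hxy
    rcases cons_cases hEq with ⟨h1, h2⟩ | ⟨u, hu1, hu2⟩
    · -- c1 = x
      subst h1
      rcases cons_cases h2 with ⟨h3, h4⟩ | ⟨w, hw1, hw2⟩
      · -- (A) c2 = y
        subst h3; subst h4; exact hm
      · -- (B) y ∈ s0 : s0 = y ::ₘ w, s = c2 ::ₘ w
        subst hw1; subst hw2
        have hly : pvLinked b (c1 ++ c2) y = true := by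
          rw [pvLinked_append]; simp [hxy]
        have ha : Mergeable b (((c1 ++ c2) ++ y) ::ₘ w) := ih rfl hly
        have hb : Mergeable b (((c1 ++ y) ++ c2) ::ₘ w) :=
          Mergeable_congr ha rfl (fun v => by simp only [List.mem_append]; tauto)
        refine Mergeable.step ?_ hb
        rw [pvLinked_append]; simp [hl]
    · rcases cons_cases hu1 with ⟨h1, h2⟩ | ⟨w, hw1, hw2⟩
      · -- c2 = x
        subst h1; subst h2
        rcases cons_cases hu2 with ⟨h3, h4⟩ | ⟨p, hp1, hp2⟩
        · -- (C) c1 = y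
          subst h3; subst h4
          exact Mergeable_congr hm rfl (fun v => by simp only [List.mem_append]; tauto)
        · -- x = c2, y ∈ s0 : s = c1 ::ₘ p, s0 = y ::ₘ p
          subst hp1; subst hp2
          have hly : pvLinked b (c1 ++ c2) y = true := by
            rw [pvLinked_append]; simp [hxy]
          have ha : Mergeable b (((c1 ++ c2) ++ y) ::ₘ p) := ih rfl hly
          have hb : Mergeable b (((c2 ++ y) ++ c1) ::ₘ p) :=
            Mergeable_congr ha rfl (fun v => by simp only [List.mem_append]; tauto)
          refine Mergeable.step ?_ hb
          rw [pvLinked_append]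
          have : pvLinked b c2 c1 = true := by rw [← pvLinked_symm]; exact hl
          simp [this]
      · -- x ∈ s0 : s0 = x ::ₘ w, u = c2 ::ₘ w
        subst hw1; subst hw2
        rcases cons_cases hu2 with ⟨h3, h4⟩ | ⟨q, hq1, hq2⟩
        · -- y = c1, s = c2 ::ₘ w
          subst h3; subst h4
          have hlx : pvLinked b (y ++ c2) x = true := by
            rw [pvLinked_append]
            have : pvLinked b y x = true := by rw [← pvLinked_symm]; exact hxy
            simp [this]
          have ha : Mergeable b (((y ++ c2) ++ x) ::ₘ w) := ih rfl hlx
          have hb : Mergeable b (((x ++ y) ++ c2) ::ₘ w) :=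
            Mergeable_congr ha rfl (fun v => by simp only [List.mem_append]; tauto)
          refine Mergeable.step ?_ hb
          rw [pvLinked_append]; simp [hl]
        · rcases cons_cases hq2 with ⟨h5, h6⟩ | ⟨r, hr1, hr2⟩
          · -- y = c2 (h5 : c2 = y), s = c1 ::ₘ q, w = q
            subst hq1; subst h5; subst h6
            have hlx : pvLinked b (c1 ++ c2) x = true := by
              rw [pvLinked_append]
              have : pvLinked b c2 x = true := by rw [← pvLinked_symm]; exact hxy
              simp [this]
            have ha : Mergeable b (((c1 ++ c2) ++ x) ::ₘ w) := ih rfl hlx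
            have hb : Mergeable b (((x ++ c2) ++ c1) ::ₘ w) :=
              Mergeable_congr ha rfl (fun v => by simp only [List.mem_append]; tauto)
            refine Mergeable.step ?_ hb
            rw [pvLinked_append]
            have : pvLinked b c2 c1 = true := by rw [← pvLinked_symm]; exact hl
            simp [this]
          · -- x, y ∈ s0 deep : s = c1 ::ₘ c2 ::ₘ r, w = y ::ₘ r
            subst hq1; subst hr2; subst hr1
            have h1 : Mergeable b ((x ++ y) ::ₘ (c1 ++ c2) ::ₘ r) :=
              ih (by rw [Multiset.cons_swap (c1 ++ c2) x, Multiset.cons_swap (c1 ++ c2) y]) hxy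
            have h2 : Mergeable b (c1 ::ₘ c2 ::ₘ (x ++ y) ::ₘ r) :=
              Mergeable.step hl ((Multiset.cons_swap _ _ _) ▸ h1)
            rw [Multiset.cons_swap (x ++ y) c1, Multiset.cons_swap (x ++ y) c2]
            exact h2

theorem Mergeable_blocked {b : List (List Int)} :
    ∀ {t : Multiset (List Int)}, Mergeable b t →
    ∀ {cur : List Int} {s : Multiset (List Int)},
      t = cur ::ₘ s → (∀ c ∈ s, pvLinked b cur c = false) → s = 0 := by
  intro t ht
  induction ht with
  | single c0 =>
    intro cur s hEq _
    exact ((Multiset.singleton_eq_cons_iff _).1 hEq).2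
  | step hl hm ih =>
    rename_i s0 c1 c2
    intro cur s hEq hblock
    rcases cons_cases hEq with ⟨h1, h2⟩ | ⟨u, hu1, hu2⟩
    · -- c1 = cur : c2 ∈ s
      subst h1
      have := hblock c2 (h2 ▸ Multiset.mem_cons_self _ _)
      rw [this] at hl; exact Bool.noConfusion hl
    · rcases cons_cases hu1 with ⟨h1, h2⟩ | ⟨w, hw1, hw2⟩
      · -- c2 = cur : c1 ∈ s
        subst h1; subst hu2
        have := hblock c1 (Multiset.mem_cons_self _ _)
        rw [pvLinked_symm] at this
        rw [this] at hl; exact Bool.noConfusion hl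
      · -- cur ∈ s0
        subst hu2; subst hw2; subst hw1
        have hc1 : c1 ∈ c1 ::ₘ c2 ::ₘ w := Multiset.mem_cons_self _ _
        have hc2 : c2 ∈ c1 ::ₘ c2 ::ₘ w := Multiset.mem_cons_of_mem (Multiset.mem_cons_self _ _)
        have hz : (c1 ++ c2) ::ₘ w = 0 := by
          apply ih (Multiset.cons_swap _ _ _)
          intro c hc
          rcases Multiset.mem_cons.1 hc with rfl | hc
          · rw [pvLinked_symm, pvLinked_append]
            rw [pvLinked_symm b c1 cur, pvLinked_symm b c2 cur]
            simp [hblock c1 hc1, hblock c2 hc2]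
          · exact hblock c (Multiset.mem_cons_of_mem (Multiset.mem_cons_of_mem hc))
        exact absurd hz (Multiset.cons_ne_zero)

-- ---- A ↔ Mergeable ----

theorem pvCombos2_mem {l : List (List Int)} {x y : List Int}
    (h : (x, y) ∈ pvCombos2 l) :
    ∃ s : Multiset (List Int), (l : Multiset (List Int)) = x ::ₘ y ::ₘ s := by
  induction l with
  | nil => simp [pvCombos2] at h
  | cons c cs ih =>
    simp only [pvCombos2, List.mem_append, List.mem_map] at h
    rcases h with ⟨y', hy', heq⟩ | h
    · cases heq
      refine ⟨(cs : Multiset (List Int)).erase y, ?_⟩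
      rw [show ((x :: cs : List (List Int)) : Multiset (List Int)) = x ::ₘ (cs : Multiset (List Int)) from rfl,
        Multiset.cons_erase (by simpa using hy')]
    · obtain ⟨s, hs⟩ := ih h
      exact ⟨c ::ₘ s, by
        rw [show ((c :: cs : List (List Int)) : Multiset (List Int)) = c ::ₘ (cs : Multiset (List Int)) from rfl, hs,
          Multiset.cons_swap c x, Multiset.cons_swap c y]⟩

theorem pvBridgeTest_iff (comp : List Int) (br : List Int × List Int) :
    pvBridgeTest comp br = true ↔ (∃ v ∈ comp, v ∈ br.1) ∧ (∃ v ∈ comp, v ∈ br.2) := by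
  simp [pvBridgeTest, List.length_pos_iff, List.eq_nil_iff_forall_not_mem, List.mem_filter]

theorem pvLinked_of_test {b : List (List Int)} {comp c1 c2 : List Int}
    (hb : comp ∈ b) (ht : pvBridgeTest comp (c1, c2) = true) : pvLinked b c1 c2 = true := by
  rw [pvBridgeTest_iff] at ht
  exact (pvLinked_iff b c1 c2).2 ⟨comp, hb, ht.1, ht.2⟩

theorem pvFindBridge_some {b : List (List Int)} {bridges : List (List Int × List Int)}
    {c1 c2 : List Int} (h : pvFindBridge b bridges = some (c1, c2)) :
    (c1, c2) ∈ bridges ∧ pvLinked b c1 c2 = true := by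
  obtain ⟨comp, hcomp, hfind⟩ := List.exists_of_findSome?_eq_some h
  exact ⟨List.mem_of_find?_eq_some hfind,
    pvLinked_of_test hcomp (List.find?_some hfind)⟩

theorem A_iff : ∀ (n : ℕ) (a : List (List Int)) (b : List (List Int)), a.length = n →
    (bridges_cycles a b = true ↔ (a ≠ [] ∧ Mergeable b (a : Multiset (List Int)))) := by
  intro n
  induction n using Nat.strong_induction_on with
  | _ n IH =>
    intro a b hlen
    by_cases h1 : a.length = 1
    · obtain ⟨c, rfl⟩ := List.length_eq_one_iff.1 h1
      rw [bridges_cycles]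
      simp only [List.length_cons, List.length_nil, if_pos]
      constructor
      · intro _
        exact ⟨List.cons_ne_nil c [], Mergeable.single c⟩
      · intro _; trivial
    · rw [bridges_cycles, if_neg h1]
      split
      · -- no bridge found
        rename_i hf
        constructor
        · intro hfalse; exact absurd hfalse (by simp)
        · rintro ⟨hne, hM⟩
          exfalso
          match a, hne with
          | c :: rest, _ =>
            have hblock : ∀ d ∈ (rest : Multiset (List Int)), pvLinked b c d = false := by
              intro d hd
              rw [Multiset.mem_coe] at hd
              by_contra hT
              rw [Bool.not_eq_false] at hT
              obtain ⟨comp, hcomp, hmc, hmd⟩ := (pvLinked_iff b c d).1 hT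
              have hmem : (c, d) ∈ pvCombos2 (c :: rest) := by
                simp only [pvCombos2, List.mem_append, List.mem_map]
                exact Or.inl ⟨d, hd, rfl⟩
              have := (List.findSome?_eq_none_iff.1 hf) comp hcomp
              have := (List.find?_eq_none.1 this) (c, d) hmem
              exact this ((pvBridgeTest_iff comp (c, d)).2 ⟨hmc, hmd⟩)
            have := Mergeable_blocked hM rfl hblock
            rw [Multiset.coe_eq_zero] at this
            subst this
            exact h1 rfl
      · -- a bridge (c1, c2) was found
        rename_i c1 c2 hf
        obtain ⟨hmem, hl⟩ := pvFindBridge_some hf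
        obtain ⟨s, hs⟩ := pvCombos2_mem hmem
        have hc1 : c1 ∈ a := by
          rw [← Multiset.mem_coe, hs]; exact Multiset.mem_cons_self _ _
        split
        · -- remove? a c1 = none : impossible
          rename_i hr1
          exact absurd ((PySem.List.remove?_eq_none_iff a c1).1 hr1) (by simp [hc1])
        · rename_i a1 hr1
          have ha1 : a1 = a.erase c1 := by
            rw [PySem.List.remove?_eq_some_erase a c1 hc1] at hr1
            exact (Option.some.inj hr1).symm
          have ha1m : (a1 : Multiset (List Int)) = c2 ::ₘ s := by
            have hper : a.Perm (c1 :: a.erase c1) := List.perm_cons_erase hc1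
            have ham : (a : Multiset (List Int)) = c1 ::ₘ ↑a1 := by
              rw [ha1]; exact Multiset.coe_eq_coe.2 hper
            have := ham.symm.trans hs
            exact (Multiset.cons_inj_right c1).1 this
          have hc2 : c2 ∈ a1 := by
            rw [← Multiset.mem_coe, ha1m]; exact Multiset.mem_cons_self _ _
          split
          · -- remove? a1 c2 = none : impossible
            rename_i hr2
            exact absurd ((PySem.List.remove?_eq_none_iff a1 c2).1 hr2) (by simp [hc2])
          · rename_i a2 hr2
            have ha2 : a2 = a1.erase c2 := by
              rw [PySem.List.remove?_eq_some_erase a1 c2 hc2] at hr2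
              exact (Option.some.inj hr2).symm
            have ha2m : (a2 : Multiset (List Int)) = s := by
              have hper : a1.Perm (c2 :: a1.erase c2) := List.perm_cons_erase hc2
              have ham : (a1 : Multiset (List Int)) = c2 ::ₘ ↑a2 := by
                rw [ha2]; exact Multiset.coe_eq_coe.2 hper
              have := ham.symm.trans ha1m
              exact (Multiset.cons_inj_right c2).1 this
            have hlt : (a2 ++ [c1 ++ c2]).length < n := by
              have e1 := pvRemove?_length hr1
              have e2 := pvRemove?_length hr2
              simp only [List.length_append, List.length_cons, List.length_nil]
              omega
            rw [IH _ hlt (a2 ++ [c1 ++ c2]) b rfl]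
            have hm2 : ((a2 ++ [c1 ++ c2] : List (List Int)) : Multiset (List Int))
                = (c1 ++ c2) ::ₘ s := by
              show (a2 : Multiset (List Int)) + ↑([c1 ++ c2]) = _
              rw [show (↑([c1 ++ c2]) : Multiset (List Int)) = (c1 ++ c2) ::ₘ 0 from rfl,
                Multiset.add_cons, ha2m, add_zero]
            constructor
            · rintro ⟨_, hM⟩
              refine ⟨by rintro rfl; simp at hs, ?_⟩
              rw [hs]
              exact Mergeable.step hl (hm2 ▸ hM)
            · rintro ⟨_, hM⟩
              refine ⟨by simp, ?_⟩
              rw [hm2]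
              exact Mergeable_exchange hM hs hl

-- ---- B ↔ Mergeable ----

theorem pvPass_unchanged (b : List (List Int)) (cur : List Int) (rest : List (List Int))
    (h : (pvPass b cur rest).2.2 = false) :
    (pvPass b cur rest).2.1 = rest ∧ ∀ c ∈ rest, pvLinked b cur c = false := by
  induction rest with
  | nil => simp [pvPass]
  | cons c cs ih =>
    simp only [pvPass] at h ⊢
    split at h <;> rename_i hl
    · simp at h
    · simp only [hl, if_neg]
      obtain ⟨h1, h2⟩ := ih h
      refine ⟨by simp [h1], ?_⟩
      intro d hd
      rcases List.mem_cons.1 hd with rfl | hd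
      · exact Bool.not_eq_true _ ▸ hl
      · exact h2 d hd

theorem pvPass_back (b : List (List Int)) :
    ∀ (rest : List (List Int)) (cur : List Int) (extra : Multiset (List Int)),
    Mergeable b ((pvPass b cur rest).1 ::ₘ (↑(pvPass b cur rest).2.1 + extra)) →
    Mergeable b (cur ::ₘ (↑rest + extra)) := by
  intro rest
  induction rest with
  | nil => intro cur extra h; simpa [pvPass] using h
  | cons c cs ih =>
    intro cur extra h
    rw [show ((c :: cs : List (List Int)) : Multiset (List Int)) = c ::ₘ ↑cs from rfl,
      Multiset.cons_add]
    simp only [pvPass] at h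
    split at h <;> rename_i hl
    · exact Mergeable.step hl (ih (cur ++ c) extra h)
    · dsimp only at h
      rw [show (↑(c :: (pvPass b cur cs).2.1) : Multiset (List Int)) = c ::ₘ ↑(pvPass b cur cs).2.1 from rfl,
        Multiset.cons_add, ← Multiset.add_cons] at h
      have := ih cur (c ::ₘ extra) h
      rwa [Multiset.add_cons] at this

theorem pvPass_fwd (b : List (List Int)) :
    ∀ (rest : List (List Int)) (cur : List Int) (extra : Multiset (List Int)),
    Mergeable b (cur ::ₘ (↑rest + extra)) →
    Mergeable b ((pvPass b cur rest).1 ::ₘ (↑(pvPass b cur rest).2.1 + extra)) := by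
  intro rest
  induction rest with
  | nil => intro cur extra h; simpa [pvPass] using h
  | cons c cs ih =>
    intro cur extra h
    rw [show ((c :: cs : List (List Int)) : Multiset (List Int)) = c ::ₘ ↑cs from rfl,
      Multiset.cons_add] at h
    simp only [pvPass]
    split <;> rename_i hl
    · exact ih (cur ++ c) extra (Mergeable_exchange h rfl hl)
    · dsimp only
      rw [show (↑(c :: (pvPass b cur cs).2.1) : Multiset (List Int)) = c ::ₘ ↑(pvPass b cur cs).2.1 from rfl,
        Multiset.cons_add, ← Multiset.add_cons]
      exact ih cur (c ::ₘ extra) (by rw [Multiset.add_cons]; exact h)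

theorem pvGrow_iff (b : List (List Int)) :
    ∀ (n : ℕ) (rest : List (List Int)) (cur : List Int), rest.length = n →
    (pvGrow b cur rest = true ↔ Mergeable b (cur ::ₘ (rest : Multiset (List Int)))) := by
  intro n
  induction n using Nat.strong_induction_on with
  | _ n IH =>
    intro rest cur hlen
    match rest with
    | [] =>
      rw [pvGrow]
      simpa using Mergeable.single cur
    | c :: cs =>
      rw [pvGrow]
      split <;> rename_i hch
      · have hlt : (pvPass b cur (c :: cs)).2.1.length < n :=
          hlen ▸ pvPass_changed_lt b cur (c :: cs) hch
        rw [IH _ hlt _ _ rfl]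
        constructor
        · intro h
          have := pvPass_back b (c :: cs) cur 0 (by simpa using h)
          simpa using this
        · intro h
          have := pvPass_fwd b (c :: cs) cur 0 (by simpa using h)
          simpa using this
      · obtain ⟨h1, h2⟩ := pvPass_unchanged b cur (c :: cs) (Bool.not_eq_true _ ▸ hch)
        rw [h1]
        simp only [List.isEmpty_cons, Bool.false_eq_true, false_iff]
        intro hM
        have := Mergeable_blocked hM rfl (fun d hd => h2 d (Multiset.mem_coe.1 hd))
        rw [Multiset.coe_eq_zero] at this
        exact List.cons_ne_nil c cs this

theorem B_iff (a : List (List Int)) (b : List (List Int)) :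
    bridges_cycles_alt a b = true ↔ (a ≠ [] ∧ Mergeable b (a : Multiset (List Int))) := by
  match a with
  | [] => simp [bridges_cycles_alt]
  | c :: rest =>
    rw [show bridges_cycles_alt (c :: rest) b = pvGrow b c rest from rfl,
      pvGrow_iff b rest.length rest c rfl]
    constructor
    · intro h; exact ⟨List.cons_ne_nil c rest, h⟩
    · rintro ⟨-, h⟩; exact h

-- ===== VERDICT (by name: the statement is the Claim_ definition above) =====
theorem bridges_cycles_spec : Claim_equal_bridges_cycles := by
  intro a b _
  unfold Spec_bridges_cycles
  have h := (A_iff a.length a b rfl).trans (B_iff a b).symm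
  cases hA : bridges_cycles a b <;> cases hB : bridges_cycles_alt a b <;> simp_all
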